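-- pv_equiv track=rewrite | github.com/Arsen1302/Code-copy-detector | TestData/solutions/problem_728_5.py | solution_728_5
-- ===== SOURCE A (Python) =====
-- from typing import List
--
-- def solution_728_5(heights: List[int]) -> int:
--     #determine max height in list
--     maxHeight = max(heights)
--     #make a bucket list with maxHeight + 1 as range
--     bucket = [0 for x in range(maxHeight + 1)]
--     #fill the bucket
--     for n in heights:
--         bucket[n] += 1
--
--     i = 0
--     counter = 0
--     #iterate through heights
--     for n in heights:
--         #make sure we're always on a non-zero element in the bucket
--         while bucket[i] == 0: i += 1
--         #if bucket index is not equal to element value of heights,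
--         #then increment counter
--         if i != n: counter += 1
--         #decrement the count in the bucket on every iteration
--         bucket[i] -= 1
--
--     return counter
-- ===== SOURCE B (Python) =====
-- from typing import List
--
-- def solution_728_5(heights: List[int]) -> int:
--     expected = sorted(heights)
--     return sum(1 for a, b in zip(heights, expected) if a != b)
-- ===== Notes on version B (the rewrite author's own statement) =====
-- stated objective: simpler
-- what changed: Replaces the counting-sort bucket with zero-skipping pointer by sorting once and counting positions where the original and sorted sequences differ in a single zip pass.
-- outside the precondition, e.g. on solution_728_5([]): A raises ValueError, B returns 0; on solution_728_5([-1, 2]): A returns 1, B returns 0; on solution_728_5([-1]): A raises IndexError, B returns 0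
import Mathlib
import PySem

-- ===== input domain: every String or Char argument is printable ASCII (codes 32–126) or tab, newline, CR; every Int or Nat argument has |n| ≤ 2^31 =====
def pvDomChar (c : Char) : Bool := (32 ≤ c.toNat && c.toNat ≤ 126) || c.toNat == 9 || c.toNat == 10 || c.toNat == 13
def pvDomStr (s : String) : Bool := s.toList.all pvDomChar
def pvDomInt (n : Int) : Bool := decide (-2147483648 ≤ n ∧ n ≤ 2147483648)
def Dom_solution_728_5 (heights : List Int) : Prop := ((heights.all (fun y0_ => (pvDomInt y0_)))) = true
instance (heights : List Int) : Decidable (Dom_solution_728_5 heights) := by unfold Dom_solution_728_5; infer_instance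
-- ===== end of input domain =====

-- B sorts once and counts positions where the original and sorted sequences differ,
-- replacing A's counting-sort bucket + zero-skipping pointer; equivalence is claimed on
-- the natural domain (nonempty lists of nonnegative heights, see Pre_).

-- ===== PORT A =====
-- 'while bucket[i] == 0: i += 1' — fueled; `none` = IndexError (or the loop running past
-- the bucket, which inside Pre_ never happens); each step reads bucket[i] exactly as Python.
def pvSkipZeros : List Int → Int → Option Int
  | [], _ => none            -- bucket[i] past the end: IndexError
  | v :: rest, i => if v = 0 then pvSkipZeros rest (i + 1) else some i

-- the second 'for n in heights' loop of A, over the state (bucket, i, counter)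
def pvLoopA : List Int → List Int → Int → Int → Option Int
  | [], _, _, c => some c
  | n :: rest, b, i, c =>
    match pvSkipZeros (b.drop i.toNat) i with
    | none => none
    | some i' =>
      let c' := if i' ≠ n then c + 1 else c
      match PySem.List.pyGet? b i' with
      | none => none
      | some v =>
        match PySem.List.pySet? b i' (v - 1) with
        | none => none
        | some b' => pvLoopA rest b' i' c'

def solution_728_5 (heights : List Int) : Int :=
  match PySem.List.max? heights (fun x => x) with
  | none => 0  -- Python raises ValueError on the empty list; excluded by Pre_
  | some maxHeight =>
    let bucket0 := (PySem.List.pyRange 0 (maxHeight + 1) 1).map (fun _ => (0 : Int))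
    let bucketOpt := heights.foldl
      (fun acc n => acc.bind (fun b =>
        match PySem.List.pyGet? b n with
        | none => none
        | some v => PySem.List.pySet? b n (v + 1))) (some bucket0)
    match bucketOpt with
    | none => 0  -- IndexError; excluded by Pre_
    | some bucket =>
      match pvLoopA heights bucket 0 0 with
      | none => 0  -- IndexError; excluded by Pre_
      | some c => c

-- ===== PORT B =====
def solution_728_5_alt (heights : List Int) : Int :=
  let expected := PySem.List.sorted heights (fun x => x) false
  (heights.zip expected).foldl (fun acc p => if p.1 ≠ p.2 then acc + 1 else acc) 0

-- ===== PRECONDITION & SPEC =====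
-- Pre_ restricts to the natural domain of the task: a nonempty list of nonnegative heights.
-- It excludes the empty list, on which A's max() raises ValueError, and lists containing a
-- negative height, on which Python's negative-index wraparound into the bucket makes A
-- either raise IndexError or return an accidental count.
def Pre_solution_728_5 (heights : List Int) : Prop :=
  heights ≠ [] ∧ ∀ h ∈ heights, 0 ≤ h
instance (heights : List Int) : Decidable (Pre_solution_728_5 heights) := by
  unfold Pre_solution_728_5; infer_instance

def pvWitness_solution_728_5 : List Int := [2, 0, 1, 1]

def Spec_solution_728_5 (heights : List Int) (out : Int) : Prop := out = solution_728_5_alt heights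
instance (heights : List Int) (out : Int) : Decidable (Spec_solution_728_5 heights out) := by unfold Spec_solution_728_5; infer_instance

-- ===== CLAIM (what is proved, stated in full; the proofs are below) =====
def Claim_equal_solution_728_5 : Prop := ∀ (heights : List Int), Dom_solution_728_5 heights → Pre_solution_728_5 heights → Spec_solution_728_5 heights (solution_728_5 heights)

-- ===== LEMMAS AND PROOFS =====

-- expandSeg b t = the sorted run the bucket suffix b represents, starting at value t
def expandSeg : List Int → Int → List Int
  | [], _ => []
  | c :: rest, t => List.replicate c.toNat t ++ expandSeg rest (t + 1)

theorem mem_expandSeg {v : Int} : ∀ (b : List Int) (t : Int), v ∈ expandSeg b t → t ≤ v := by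
  intro b
  induction b with
  | nil => intro t h; simp [expandSeg] at h
  | cons c rest ih =>
    intro t h
    simp only [expandSeg, List.mem_append] at h
    rcases h with h | h
    · rcases List.eq_of_mem_replicate h with rfl; exact le_refl _
    · have := ih (t + 1) h; omega

theorem pairwise_expandSeg : ∀ (b : List Int) (t : Int), (expandSeg b t).Pairwise (· ≤ ·) := by
  intro b
  induction b with
  | nil => intro t; simp [expandSeg]
  | cons c rest ih =>
    intro t
    simp only [expandSeg]
    refine List.pairwise_append.mpr ⟨List.pairwise_replicate.mpr (by simp), ih (t + 1), ?_⟩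
    intro x hx y hy
    rcases List.eq_of_mem_replicate hx with rfl
    have := mem_expandSeg _ _ hy; omega

theorem count_expandSeg_lt {v : Int} (b : List Int) (t : Int) (h : v < t) :
    (expandSeg b t).count v = 0 := by
  rw [List.count_eq_zero]
  intro hv
  have := mem_expandSeg b t hv; omega

theorem count_expandSeg : ∀ (b : List Int) (t : Int) (j : Nat),
    (expandSeg b t).count (t + (j : Int)) = (b.getD j 0).toNat := by
  intro b
  induction b with
  | nil => intro t j; simp [expandSeg]
  | cons c rest ih =>
    intro t j
    simp only [expandSeg, List.count_append]
    cases j with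
    | zero =>
      have h0 : t + ((0 : Nat) : Int) = t := by simp
      rw [h0]
      have h2 : (expandSeg rest (t + 1)).count t = 0 :=
        count_expandSeg_lt rest (t + 1) (by omega)
      simp [h2]
    | succ k =>
      have h1 : (List.replicate c.toNat t).count (t + ((k + 1 : Nat) : Int)) = 0 := by
        rw [List.count_replicate, if_neg (by simp; omega)]
      have h2 : t + ((k + 1 : Nat) : Int) = (t + 1) + (k : Int) := by push_cast; ring
      rw [h1, h2, ih (t + 1) k, List.getD_cons_succ]
      omega

-- the head-extraction step: a nonzero bucket slot yields its index and the decremented bucket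
theorem expandSeg_drop_step (b : List Int) (j : Nat) (hj : j < b.length) (hpos : 0 < b[j]) :
    expandSeg (b.drop j) j = (j : Int) :: expandSeg ((b.set j (b[j] - 1)).drop j) (j : Int) := by
  have hd : b.drop j = b[j] :: b.drop (j + 1) := List.drop_eq_getElem_cons hj
  have hd' : (b.set j (b[j] - 1)).drop j = (b[j] - 1) :: b.drop (j + 1) := by
    rw [List.drop_eq_getElem_cons (by simpa using hj)]
    congr 1
    · simp
    · exact List.drop_set_of_lt (hnm := by omega)
  rw [hd, hd']
  simp only [expandSeg]
  have h1 : b[j].toNat = (b[j] - 1).toNat + 1 := by omega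
  rw [h1, List.replicate_succ]
  simp

-- skipping zeros walks to the first nonzero slot and preserves the represented run
theorem skip_spec' (b : List Int) (hnn : ∀ x ∈ b, 0 ≤ x) :
    ∀ (sfx : List Int) (i : Nat), sfx = b.drop i → expandSeg sfx i ≠ [] →
    ∃ (j : Nat) (hj : j < b.length), pvSkipZeros sfx (i : Int) = some (j : Int) ∧
      0 < b[j] ∧ expandSeg (b.drop i) (i : Int) = expandSeg (b.drop j) (j : Int) := by
  intro sfx
  induction sfx with
  | nil => intro i _ hne; exact absurd rfl hne
  | cons v rest ih =>
    intro i hs hne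
    have hi : i < b.length := by
      by_contra h
      rw [List.drop_eq_nil_of_le (by omega)] at hs
      exact List.cons_ne_nil v rest hs
    have hdrop : b.drop i = b[i] :: b.drop (i + 1) := List.drop_eq_getElem_cons hi
    have hrest : rest = b.drop (i + 1) := by
      rw [hdrop] at hs; exact (List.cons.injEq .. |>.mp hs).2
    have hv : v = b[i] := by
      rw [hdrop] at hs; exact (List.cons.injEq .. |>.mp hs).1
    by_cases hz : v = 0
    · have hexp : expandSeg (v :: rest) (i : Int) = expandSeg rest ((i + 1 : Nat) : Int) := by
        simp [expandSeg, hz]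
      have hne' : expandSeg rest ((i + 1 : Nat)) ≠ [] := by
        rw [← hexp]; exact hne
      obtain ⟨j, hj, hrun, hpos, heq⟩ := ih (i + 1) hrest hne'
      refine ⟨j, hj, ?_, hpos, ?_⟩
      · simp only [pvSkipZeros, hz, if_pos rfl]
        rw [show (i : Int) + 1 = ((i + 1 : Nat) : Int) by push_cast; ring]
        exact hrun
      · rw [← hs, hexp, hrest]
        exact heq
    · refine ⟨i, hi, ?_, ?_, rfl⟩
      · simp [pvSkipZeros, hz]
      · have := hnn b[i] (List.getElem_mem hi); omega

theorem set_nonneg {b : List Int} (hnn : ∀ x ∈ b, 0 ≤ x) (j : Nat) (v : Int) (hv : 0 ≤ v) :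
    ∀ x ∈ b.set j v, 0 ≤ x := by
  intro x hx
  rcases List.mem_or_eq_of_mem_set hx with h | rfl
  · exact hnn x h
  · exact hv

-- main loop invariant: pvLoopA counts the mismatches of xs against the represented run
theorem loopA_spec : ∀ (xs : List Int) (b : List Int) (i : Nat) (c : Int),
    (∀ x ∈ b, 0 ≤ x) →
    (expandSeg (b.drop i) i).length = xs.length →
    pvLoopA xs b (i : Int) c =
      some (c + ((xs.zip (expandSeg (b.drop i) i)).countP (fun p => p.1 ≠ p.2) : Int)) := by
  intro xs
  induction xs with
  | nil => intro b i c _ _; simp [pvLoopA]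
  | cons n rest ih =>
    intro b i c hnn hlen
    have hne : expandSeg (b.drop i) (i : Int) ≠ [] := by
      intro h; rw [h] at hlen; simp at hlen
    obtain ⟨j, hj, hskip, hpos, heq⟩ := skip_spec' b hnn (b.drop i) i rfl hne
    have hstep := expandSeg_drop_step b j hj hpos
    set b' := b.set j (b[j] - 1) with hb'
    have hget : PySem.List.pyGet? b (j : Int) = some b[j] := by
      rw [PySem.List.pyGet?_natCast, List.getElem?_eq_getElem hj]
    have hset : PySem.List.pySet? b (j : Int) (b[j] - 1) = some b' :=
      PySem.List.pySet?_natCast b j (b[j] - 1) hj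
    have hnn' : ∀ x ∈ b', 0 ≤ x := set_nonneg hnn j (b[j] - 1) (by omega)
    have hlen' : (expandSeg (b'.drop j) (j : Int)).length = rest.length := by
      have : (expandSeg (b.drop i) (i : Int)).length = rest.length + 1 := by
        rw [hlen]; simp
      rw [heq, hstep] at this
      simpa using this
    have hrec := ih b' j (if (j : Int) ≠ n then c + 1 else c) hnn' hlen'
    unfold pvLoopA
    simp only [Int.toNat_natCast, hskip, hget, hset]
    rw [hrec, heq, hstep]
    rw [List.zip_cons_cons, List.countP_cons]
    by_cases hcmp : (j : Int) = n
    · rw [if_neg (by simp [hcmp]), if_neg (by simp [hcmp])]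
      push_cast; ring
    · rw [if_pos (by simpa using hcmp), if_pos (by simp; exact fun h => hcmp h.symm)]
      push_cast; ring

-- the bucket-filling loop: result entry j is the count of j in xs (plus the initial entry)
theorem fill_spec : ∀ (xs : List Int) (b : List Int),
    (∀ n ∈ xs, 0 ≤ n ∧ n < (b.length : Int)) →
    xs.foldl
      (fun acc n => acc.bind (fun bb =>
        match PySem.List.pyGet? bb n with
        | none => none
        | some v => PySem.List.pySet? bb n (v + 1))) (some b) =
      some ((List.range b.length).map
        (fun j => b.getD j 0 + (xs.count (j : Int) : Int))) := by
  intro xs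
  induction xs with
  | nil =>
    intro b _
    simp only [List.foldl_nil, List.count_nil]
    congr 1
    apply List.ext_getElem (by simp)
    intro k h1 h2
    simp [List.getD_eq_getElem?_getD, List.getElem?_eq_getElem (by simpa using h2)]
  | cons n rest ih =>
    intro b hmem
    obtain ⟨hn0, hnlt⟩ := hmem n (by simp)
    have hnt : ((n.toNat : Nat) : Int) = n := by omega
    have hlt : n.toNat < b.length := by omega
    have hget : PySem.List.pyGet? b n = some b[n.toNat] := by
      rw [PySem.List.pyGet?_of_nonneg b hn0, List.getElem?_eq_getElem hlt]
    obtain ⟨v, hv⟩ : ∃ v, b[n.toNat] = v := ⟨_, rfl⟩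
    rw [hv] at hget
    have hset : PySem.List.pySet? b n (v + 1) = some (b.set n.toNat (v + 1)) := by
      rw [← hnt]; exact PySem.List.pySet?_natCast b n.toNat (v + 1) hlt
    simp only [List.foldl_cons, Option.bind_some, hget, hset]
    rw [ih (b.set n.toNat (v + 1))
        (by intro m hm; have := hmem m (by simp [hm]); simpa using this)]
    congr 1
    apply List.ext_getElem (by simp)
    intro k h1 h2
    simp only [List.getElem_map, List.getElem_range, List.length_set] at h1 h2 ⊢
    have hk : k < b.length := by simpa using h1
    have hgd : (b.set n.toNat (v + 1)).getD k 0 =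
        if k = n.toNat then v + 1 else b.getD k 0 := by
      by_cases h : k = n.toNat
      · subst h; simp [List.getD_eq_getElem?_getD, hk]
      · simp only [List.getD_eq_getElem?_getD]
        rw [List.getElem?_set_ne (i := n.toNat) (j := k) (by omega), if_neg h]
    rw [hgd, List.count_cons]
    by_cases h : k = n.toNat
    · subst h
      have hbeq : (n == ((n.toNat : Nat) : Int)) = true := by rw [beq_iff_eq]; omega
      have hbd : b.getD n.toNat 0 = v := by
        rw [List.getD_eq_getElem?_getD, List.getElem?_eq_getElem hk]; exact hv
      rw [if_pos rfl, if_pos hbeq, hbd]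
      push_cast; ring
    · have hbeq : ¬ ((n == ((k : Nat) : Int)) = true) := by rw [beq_iff_eq]; omega
      rw [if_neg h, if_neg hbeq]
      push_cast; ring

-- B's foldl counter is countP
theorem foldl_count (l : List (Int × Int)) : ∀ (c : Int),
    l.foldl (fun acc p => if p.1 ≠ p.2 then acc + 1 else acc) c =
      c + (l.countP (fun p => p.1 ≠ p.2) : Int) := by
  induction l with
  | nil => intro c; simp
  | cons p rest ih =>
    intro c
    rw [List.foldl_cons, List.countP_cons, ih]
    by_cases h : p.1 = p.2
    · simp [h]
    · simp only [ne_eq, h, not_false_eq_true, if_true, decide_not]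
      simp
      ring

-- ===== VERDICT (by name: the statement is the Claim_ definition above) =====
theorem solution_728_5_spec : Claim_equal_solution_728_5 := by
  intro heights _ hpre
  obtain ⟨hne, hnn⟩ := hpre
  unfold Spec_solution_728_5 solution_728_5 solution_728_5_alt
  -- max exists
  obtain ⟨M, hM⟩ : ∃ M, PySem.List.max? heights (fun x => x) = some M := by
    rcases h : PySem.List.max? heights (fun x => x) with _ | M
    · exact absurd ((PySem.List.max?_eq_none_iff heights (fun x => x)).mp h) hne
    · exact ⟨M, rfl⟩
  have hMmem : M ∈ heights := PySem.List.max?_mem hM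
  have hMmax : ∀ y ∈ heights, y ≤ M := PySem.List.max?_isMax hM
  have hM0 : 0 ≤ M := hnn M hMmem
  set bucket0 := (PySem.List.pyRange 0 (M + 1) 1).map (fun _ => (0 : Int)) with hb0
  have hlen0 : bucket0.length = (M + 1).toNat := by
    simp [hb0, PySem.List.length_pyRange_one]
  have hzero : ∀ j, bucket0.getD j 0 = 0 := by
    intro j
    rcases Nat.lt_or_ge j bucket0.length with h | h
    · rw [List.getD_eq_getElem?_getD, List.getElem?_eq_getElem h]
      simp [hb0]
    · rw [List.getD_eq_getElem?_getD, List.getElem?_eq_none (by omega)]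
      rfl
  have hdomfill : ∀ n ∈ heights, 0 ≤ n ∧ n < (bucket0.length : Int) := by
    intro n hn
    refine ⟨hnn n hn, ?_⟩
    have := hMmax n hn
    rw [hlen0]; omega
  set B := (List.range bucket0.length).map (fun j => bucket0.getD j 0 + (heights.count (j : Int) : Int)) with hB
  have hBlen : B.length = bucket0.length := by simp [hB]
  have hBgd : ∀ j, B.getD j 0 = if j < bucket0.length then (heights.count (j : Int) : Int) else 0 := by
    intro j
    rcases Nat.lt_or_ge j bucket0.length with h | h
    · rw [List.getD_eq_getElem?_getD, List.getElem?_eq_getElem (by simpa [hB] using h)]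
      simp [hB, hb0]
      intro hMj
      rw [hlen0] at h
      omega
    · rw [List.getD_eq_getElem?_getD, List.getElem?_eq_none (by simp [hB]; omega)]
      simp [Nat.not_lt.mpr h]
  have hBnn : ∀ x ∈ B, 0 ≤ x := by
    intro x hx
    simp only [hB, List.mem_map, List.mem_range] at hx
    obtain ⟨j, _, rfl⟩ := hx
    have := hzero j
    positivity
  -- the run represented by B is sorted heights
  have hperm : (expandSeg B 0).Perm heights := by
    rw [List.perm_iff_count]
    intro v
    rcases Int.lt_or_le v 0 with hv | hv
    · rw [count_expandSeg_lt B 0 hv, List.count_eq_zero.mpr]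
      intro hvmem; have := hnn v hvmem; omega
    · have hv' : v = (0 : Int) + ((v.toNat : Nat) : Int) := by omega
      rw [hv', count_expandSeg B 0 v.toNat, hBgd]
      by_cases h : v.toNat < bucket0.length
      · rw [if_pos h, show (((v.toNat : Nat)) : Int) = v by omega]
        simp
      · rw [if_neg h, show ((0:Int) + ((v.toNat : Nat) : Int)) = v by omega,
            List.count_eq_zero.mpr
              (fun hvmem => absurd (hMmax v hvmem) (by rw [hlen0] at h; omega))]
        rfl
  have hsorted : PySem.List.sorted heights (fun x => x) false = expandSeg B 0 :=
    PySem.List.sorted_id_eq_of_perm_of_pairwise heights (expandSeg B 0) hperm (pairwise_expandSeg B 0)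
  have hlenrun : (expandSeg (B.drop 0) 0).length = heights.length := by
    rw [List.drop_zero, ← hsorted, PySem.List.length_sorted]
  have hloop := loopA_spec heights B 0 0 hBnn (by simpa using hlenrun)
  rw [show ((0 : Nat) : Int) = (0 : Int) by rfl] at hloop
  simp only [hM]
  rw [← hb0]
  simp only [fill_spec heights bucket0 hdomfill]
  rw [← hB]
  simp only [hloop]
  rw [foldl_count, hsorted]
  simp
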